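-- pv_equiv track=rewrite | github.com/gbcolborne/ner_eval | data_utils/data_utils.py | _get_mentions_bio1
-- ===== SOURCE A (Python) =====
-- def _get_mentions_bio1(sent, allow_prefix_errors, allow_type_errors):
--     """
--     Extract entity mentions from sentence (BIO-1 encoding).
--
--     Input:
--
--     - sent: list of (line offset, token, label) tuples
--
--     - allow_prefix_errors: flag that indicates whether we allow a B to
--       follow an O. If True, we consider that this token if the first
--       token of a mention. If False, we raise an error and stop.
--
--     - allow_type_errors: flag that specifies whether we allow a B to
--       follow a B or I that has a different entity type. If False, we
--       raise an error and stop. If True, we ignore the error and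
--       consider that the token is indeed the first token of a
--       mention. There is little ambiguity as to the nature of the
--       error: the different entity types indicate that there are 2
--       different mentions, as does the second (B) prefix, so we can be
--       confident that the B should be an I (otherwise both the prefix
--       and entity type are wrong).
--
--     Output:
--
--     - list containing a (line offset, tokens, labels) tuple for each mention
--
--     """
--     mentions = []
--     mention_tokens = []
--     mention_labels = []
--     prev_prefix = "O"
--     prev_etype = None
--     # Add an O to the end of the sentence to catch sentence-ending mentions
--     padded_sent = sent[:]
--     padded_sent.append((padded_sent[-1][0]+1, None, "O"))
--     for (line, token, label) in padded_sent:
--         # Split label into BIO prefix and entity type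
--         prefix = label[0]
--         if prefix != "O":
--             etype = label[2:]
--         else:
--             etype = None
--
--         # Check for labeling inconsistencies. A B should follow a B or
--         # I of the same entity type.
--         if prefix == "B":
--             # Check previous prefix.
--             if prev_prefix == "O":
--                 if allow_prefix_errors:
--                     # Although this B prefix is inconsistent, we
--                     # ignore the error (see function documentation).
--                     pass
--                 else:
--                     msg = "ERROR at line {}: B found after an O".format(line)
--                     raise ValueError(msg)
--             # Check previous entity type.
--             if etype != prev_etype:
--                 if allow_type_errors:
--                     # Although this entity type is inconsistent, we
--                     # ignore the error (see function documentation).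
--                     pass
--                 else:
--                     msg = "ERROR at line {}: ".format(line)
--                     msg += "B-{} found after {}-{}".format(etype, prev_prefix, prev_etype)
--                     raise ValueError(msg)
--
--         # Check if a mention starts here. Note that if this is a B
--         # and it follows an O, we still consider that a mention starts
--         # here, unless allow_prefix_errors is False, in which case an
--         # error will already have been raised. See function
--         # documentation for more details.
--         mention_starts_here = False
--         if (prefix == "I" and etype != prev_etype) or prefix == "B":
--             mention_starts_here = True
--
--         # Check if the previous token was the last token of a
--         # mention. If so, output that mention, and initialize a new mention.
--         if prev_etype and (prefix=="O" or mention_starts_here):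
--             line_offset = line-len(mention_tokens)
--             mentions.append((line_offset, mention_tokens, mention_labels))
--             mention_tokens = []
--             mention_labels = []
--
--         # If token is part of a mention, append token and label to
--         # those of the current mention. Note that if the label entity
--         # type is not consistent with those of the other tokens in the
--         # mention, we ignore this error, unless allow_type_errors is
--         # False, in which case an error will already have been
--         # raised. See function documentation for more details.
--         if prefix != "O":
--             mention_tokens.append(token)
--             mention_labels.append(label)
--
--         # Prepare to move on to next token
--         prev_prefix = prefix
--         prev_etype = etype
--     return mentions
-- ===== SOURCE B (Python) =====
-- def _get_mentions_bio1(sent, allow_prefix_errors, allow_type_errors):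
--     """Extract entity mentions from a BIO-1 tagged sentence.
--
--     Staged decomposition: pass 1 validates each B label against its
--     predecessor label (same errors, same order as a one-pass check);
--     pass 2 pairs every token with its predecessor label and compiles it
--     into an explicit (line, token, label, flush, include) event; pass 3
--     replays the events with a trivial accumulator and flushes the last
--     open mention after the loop instead of padding with a sentinel O.
--     """
--     labels = [t[2] for t in sent]
--     prevs = ["O"] + labels[:-1]
--     # Pass 1: validate B labels against their predecessor label.
--     for (line, _, lab), prev in zip(sent, prevs):
--         if lab[0] == "B":
--             pe = None if prev[0] == "O" else prev[2:]
--             if prev[0] == "O" and not allow_prefix_errors: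
--                 raise ValueError("ERROR at line {}: B found after an O".format(line))
--             if lab[2:] != pe and not allow_type_errors:
--                 msg = "ERROR at line {}: ".format(line)
--                 msg += "B-{} found after {}-{}".format(lab[2:], prev[0], pe)
--                 raise ValueError(msg)
--     # Pass 2: compile each (predecessor label, token) bigram into an event.
--     events = []
--     for (line, token, lab), prev in zip(sent, prevs):
--         pe = None if prev[0] == "O" else prev[2:]
--         etype = None if lab[0] == "O" else lab[2:]
--         starts = lab[0] == "B" or (lab[0] == "I" and etype != pe)
--         flush = bool(pe) and (lab[0] == "O" or starts)
--         events.append((line, token, lab, flush, lab[0] != "O"))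
--     # Pass 3: replay the events.
--     mentions, toks, labs = [], [], []
--     for line, token, lab, flush, include in events:
--         if flush:
--             mentions.append((line - len(toks), toks, labs))
--             toks, labs = [], []
--         if include:
--             toks.append(token)
--             labs.append(lab)
--     if sent and (None if labels[-1][0] == "O" else labels[-1][2:]):
--         mentions.append((sent[-1][0] + 1 - len(toks), toks, labs))
--     return mentions
-- ===== Notes on version B (the rewrite author's own statement) =====
-- stated objective: alternative
-- what changed: B replaces A's single interleaved loop over a sentinel-O-padded copy with staged passes: a separate validation pass, a pass that pairs each token with its predecessor label and compiles it into an explicit (line,token,label,flush,include) event, and a trivial replay of the events with a post-loop flush, eliminating the prev_prefix/prev_etype running state and the list copy/padding.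
import Mathlib
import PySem

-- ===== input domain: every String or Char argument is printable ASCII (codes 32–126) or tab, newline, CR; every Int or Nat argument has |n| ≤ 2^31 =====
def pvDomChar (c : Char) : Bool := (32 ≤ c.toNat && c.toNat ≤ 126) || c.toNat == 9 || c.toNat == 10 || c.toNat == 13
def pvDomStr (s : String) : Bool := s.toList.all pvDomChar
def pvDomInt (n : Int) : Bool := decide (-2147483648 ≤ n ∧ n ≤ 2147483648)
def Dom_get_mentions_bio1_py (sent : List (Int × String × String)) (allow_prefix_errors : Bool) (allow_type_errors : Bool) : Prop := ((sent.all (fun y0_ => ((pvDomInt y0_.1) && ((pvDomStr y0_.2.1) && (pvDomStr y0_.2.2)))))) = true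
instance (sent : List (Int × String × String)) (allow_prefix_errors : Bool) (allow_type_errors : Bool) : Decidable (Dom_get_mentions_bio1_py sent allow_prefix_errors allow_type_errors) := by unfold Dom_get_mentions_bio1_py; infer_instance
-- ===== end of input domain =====

-- B restructures A's single interleaved loop into staged passes (separate validation,
-- label-bigram events compiled up front, a trivial replay with a post-loop flush instead
-- of A's sentinel-O padding of a copied list); equal return value on Pre_.

-- Python truthiness of an Optional[str]: None and "" are falsy.
def pvTruthy (o : Option String) : Bool :=
  match o with
  | none => false
  | some s => s ≠ ""

-- ===== PORT A =====
-- state: (mentions, mention_tokens, mention_labels, prev_prefix, prev_etype)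
def pvStepA (st : List (Int × List String × List String) × List String × List String × Char × Option String)
    (tok : Int × String × String) :
    List (Int × List String × List String) × List String × List String × Char × Option String :=
  let (mentions, mtoks, mlabs, _prev_prefix, prev_etype) := st
  let (line, token, label) := tok
  -- prefix = label[0] (IndexError on an empty label is excluded by Pre_)
  let pfx : Char := (PySem.Str.pyGet? label 0).getD 'O'
  -- etype = label[2:] if prefix != "O" else None
  let etype : Option String := if pfx ≠ 'O' then some (PySem.Str.slice label (some 2) none) else none
  -- (A's consistency checks on a B prefix only raise ValueError; those inputs are excluded by Pre_)
  let mention_starts_here : Bool := (pfx == 'I' && etype != prev_etype) || pfx == 'B'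
  let (mentions, mtoks, mlabs) :=
    if pvTruthy prev_etype && (pfx == 'O' || mention_starts_here) then
      (mentions ++ [(line - (mtoks.length : Int), mtoks, mlabs)], ([] : List String), ([] : List String))
    else (mentions, mtoks, mlabs)
  let (mtoks, mlabs) :=
    if pfx ≠ 'O' then (mtoks ++ [token], mlabs ++ [label]) else (mtoks, mlabs)
  (mentions, mtoks, mlabs, pfx, etype)

def get_mentions_bio1_py (sent : List (Int × String × String)) (allow_prefix_errors : Bool) (allow_type_errors : Bool) : List (Int × List String × List String) :=
  match sent.getLast? with
  | none => []  -- Python: IndexError from padded_sent[-1] on empty sent (excluded by Pre_)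
  | some last =>
    -- padded_sent = sent[:] + [(last line + 1, None, "O")]; the None token is ported as ""
    -- (it is never appended to a mention, its prefix being "O")
    let padded := sent ++ [(last.1 + 1, "", "O")]
    (padded.foldl pvStepA ([], [], [], 'O', none)).1

-- ===== PORT B =====
-- lab[0] (with the 'O' default never used on Pre_: labels are non-empty there)
def pvPfx (lab : String) : Char := (PySem.Str.pyGet? lab 0).getD 'O'
-- None if lab[0] == "O" else lab[2:]
def pvEty (lab : String) : Option String :=
  if pvPfx lab = 'O' then none else some (PySem.Str.slice lab (some 2) none)

-- pass 1 of Source B only raises ValueError (same errors as A, in the same order); on the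
-- inputs Pre_ admits it is a no-op, so it contributes nothing to the returned value.
-- pass 2: compile a (token, predecessor label) bigram into an event
def pvEventB (pr : (Int × String × String) × String) : Int × String × String × Bool × Bool :=
  let ((line, token, lab), prev) := pr
  let pe : Option String := if pvPfx prev = 'O' then none else some (PySem.Str.slice prev (some 2) none)
  let etype : Option String := pvEty lab
  let starts : Bool := pvPfx lab == 'B' || (pvPfx lab == 'I' && etype != pe)
  let flush : Bool := pvTruthy pe && (pvPfx lab == 'O' || starts)
  (line, token, lab, flush, pvPfx lab != 'O')

-- pass 3: replay one event; state: (mentions, toks, labs)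
def pvReplayB (st : List (Int × List String × List String) × List String × List String)
    (ev : Int × String × String × Bool × Bool) :
    List (Int × List String × List String) × List String × List String :=
  let (mentions, toks, labs) := st
  let (line, token, lab, flush, inc) := ev
  let (mentions, toks, labs) :=
    if flush then
      (mentions ++ [(line - (toks.length : Int), toks, labs)], ([] : List String), ([] : List String))
    else (mentions, toks, labs)
  if inc then (mentions, toks ++ [token], labs ++ [lab]) else (mentions, toks, labs)

def get_mentions_bio1_py_alt (sent : List (Int × String × String)) (allow_prefix_errors : Bool) (allow_type_errors : Bool) : List (Int × List String × List String) :=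
  let labels := sent.map (fun t => t.2.2)
  let prevs := "O" :: labels.dropLast
  let events := (sent.zip prevs).map pvEventB
  let (mentions, toks, labs) := events.foldl pvReplayB ([], [], [])
  -- post-loop flush: if sent and the last etype is truthy
  match sent.getLast? with
  | none => mentions
  | some last =>
    if pvTruthy (pvEty last.2.2) then
      mentions ++ [(last.1 + 1 - (toks.length : Int), toks, labs)]
    else mentions

-- ===== PRECONDITION & SPEC =====
-- one adjacent-pair validity check: a B label may follow an O-prefixed label only when
-- allow_prefix_errors, and (its type always differing from an O predecessor's None)
-- must match its predecessor's entity type unless allow_type_errors.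
def pvPairOk (allow_prefix_errors : Bool) (allow_type_errors : Bool) (prev cur : String) : Bool :=
  !(cur.toList.head? == some 'B') ||
    ((!(prev.toList.head? == some 'O') || allow_prefix_errors) &&
     ((if prev.toList.head? = some 'O' then (none : Option (List Char)) else some (prev.toList.drop 2))
        == some (cur.toList.drop 2) || allow_type_errors))

-- Pre_ excludes exactly the inputs on which the Python A raises: the empty sentence and
-- an empty label (IndexError), and an invalid B label (ValueError).
def Pre_get_mentions_bio1_py (sent : List (Int × String × String)) (allow_prefix_errors : Bool) (allow_type_errors : Bool) : Prop :=
  sent ≠ [] ∧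
  sent.all (fun t => t.2.2 ≠ "") = true ∧
  (let labs := "O" :: sent.map (fun t => t.2.2)
   (labs.zip labs.tail).all (fun pc => pvPairOk allow_prefix_errors allow_type_errors pc.1 pc.2) = true)
instance (sent : List (Int × String × String)) (allow_prefix_errors : Bool) (allow_type_errors : Bool) : Decidable (Pre_get_mentions_bio1_py sent allow_prefix_errors allow_type_errors) := by unfold Pre_get_mentions_bio1_py; infer_instance

def pvWitness_get_mentions_bio1_py : (List (Int × String × String)) × Bool × Bool :=
  ([(1, "John", "B-PER"), (2, "Smith", "I-PER"), (3, "ran", "O")], true, true)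

def Spec_get_mentions_bio1_py (sent : List (Int × String × String)) (allow_prefix_errors : Bool) (allow_type_errors : Bool) (out : List (Int × List String × List String)) : Prop := out = get_mentions_bio1_py_alt sent allow_prefix_errors allow_type_errors
instance (sent : List (Int × String × String)) (allow_prefix_errors : Bool) (allow_type_errors : Bool) (out : List (Int × List String × List String)) : Decidable (Spec_get_mentions_bio1_py sent allow_prefix_errors allow_type_errors out) := by unfold Spec_get_mentions_bio1_py; infer_instance

-- ===== CLAIM (what is proved, stated in full; the proofs are below) =====
def Claim_equal_get_mentions_bio1_py : Prop := ∀ (sent : List (Int × String × String)) (allow_prefix_errors : Bool) (allow_type_errors : Bool), Dom_get_mentions_bio1_py sent allow_prefix_errors allow_type_errors → Pre_get_mentions_bio1_py sent allow_prefix_errors allow_type_errors → Spec_get_mentions_bio1_py sent allow_prefix_errors allow_type_errors (get_mentions_bio1_py sent allow_prefix_errors allow_type_errors)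
-- ===== LEMMAS AND PROOFS =====

-- whole pass 2+3 of B, as a function of the seed predecessor label (proof-only)
def pvReplayAll (ts : List (Int × String × String)) (prev : String)
    (st : List (Int × List String × List String) × List String × List String) :
    List (Int × List String × List String) × List String × List String :=
  ((ts.zip (prev :: (ts.map (fun t => t.2.2)).dropLast)).map pvEventB).foldl pvReplayB st

-- one step of A's loop, seen through the event of the (token, predecessor label) bigram
theorem pvStep_event (M : List (Int × List String × List String)) (T L : List String)
    (P : Char) (prev : String) (t : Int × String × String) :
    pvStepA (M, T, L, P, pvEty prev) t =
      ((pvReplayB (M, T, L) (pvEventB (t, prev))).1,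
       (pvReplayB (M, T, L) (pvEventB (t, prev))).2.1,
       (pvReplayB (M, T, L) (pvEventB (t, prev))).2.2,
       pvPfx t.2.2, pvEty t.2.2) := by
  obtain ⟨line, token, lab⟩ := t
  simp only [pvStepA, pvEventB, pvReplayB, pvEty, pvPfx]
  by_cases h : (PySem.Str.pyGet? lab 0).getD 'O' = 'O' <;>
    simp [h, Bool.or_comm] <;> split_ifs <;> simp_all

theorem pvReplayAll_cons (t : Int × String × String) (ts : List (Int × String × String))
    (prev : String) (st : List (Int × List String × List String) × List String × List String) :
    pvReplayAll (t :: ts) prev st = pvReplayAll ts t.2.2 (pvReplayB st (pvEventB (t, prev))) := by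
  unfold pvReplayAll
  cases ts <;> simp

-- main invariant: A's fold over the sentence equals B's event replay, and A's carried
-- prev_etype ends as the etype of the last label (or of the seed when the list is empty)
theorem pvMain (ts : List (Int × String × String)) (prev : String)
    (M : List (Int × List String × List String)) (T L : List String) (P : Char) :
    ∃ Q : Char,
      ts.foldl pvStepA (M, T, L, P, pvEty prev) =
        ((pvReplayAll ts prev (M, T, L)).1, (pvReplayAll ts prev (M, T, L)).2.1,
         (pvReplayAll ts prev (M, T, L)).2.2,
         Q, pvEty ((ts.getLast?.map (fun t => t.2.2)).getD prev)) := by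
  induction ts generalizing prev M T L P with
  | nil => exact ⟨P, rfl⟩
  | cons t ts ih =>
    rw [List.foldl_cons, pvStep_event, pvReplayAll_cons]
    obtain ⟨Q, hQ⟩ := ih t.2.2 (pvReplayB (M, T, L) (pvEventB (t, prev))).1
      (pvReplayB (M, T, L) (pvEventB (t, prev))).2.1
      (pvReplayB (M, T, L) (pvEventB (t, prev))).2.2 (pvPfx t.2.2)
    refine ⟨Q, ?_⟩
    rw [hQ]
    cases ts with
    | nil => simp
    | cons u us =>
      obtain ⟨x, hx⟩ := Option.isSome_iff_exists.mp (List.getLast?_isSome.mpr (List.cons_ne_nil u us))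
      simp [hx]

-- A's step at the sentinel (line, None, "O") token: flush iff prev_etype is truthy
theorem pvStepA_pad (m : List (Int × List String × List String)) (tk lb : List String)
    (pp : Char) (pe : Option String) (line : Int) :
    pvStepA (m, tk, lb, pp, pe) (line, "", "O") =
      (if pvTruthy pe then (m ++ [(line - (tk.length : Int), tk, lb)], ([] : List String), ([] : List String), 'O', (none : Option String))
       else (m, tk, lb, 'O', none)) := by
  simp only [pvStepA, show ((PySem.Str.pyGet? "O" 0).getD 'O') = 'O' from by decide]
  by_cases hpe : pvTruthy pe = true <;> simp [hpe]

-- ===== VERDICT (by name: the statement is the Claim_ definition above) =====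
theorem get_mentions_bio1_py_spec : Claim_equal_get_mentions_bio1_py := by
  intro sent ape ate _hdom hpre
  unfold Spec_get_mentions_bio1_py
  obtain ⟨hne, -, -⟩ := hpre
  obtain ⟨last, hlast⟩ := Option.isSome_iff_exists.mp (List.getLast?_isSome.mpr hne)
  have h0 : (none : Option String) = pvEty "O" := by decide
  obtain ⟨Q, hQ⟩ := pvMain sent "O" [] [] [] 'O'
  unfold get_mentions_bio1_py get_mentions_bio1_py_alt
  rw [hlast]
  simp only [List.foldl_append, List.foldl_cons, List.foldl_nil]
  rw [h0, hQ, pvStepA_pad]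
  have hlab : ((sent.getLast?.map (fun t => t.2.2)).getD "O") = last.2.2 := by
    rw [hlast]; rfl
  rw [hlab]
  simp only [pvReplayAll]
  by_cases hc : pvTruthy (pvEty last.2.2) = true <;> simp [hc]
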